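-- pv_equiv track=rewrite | github.com/selene/adventofcode2022 | src/12_advent.py | lines_to_map
-- ===== SOURCE A (Python) =====
-- from collections import deque, namedtuple
--
-- Pos = namedtuple('Pos', ['row', 'col'])
--
-- def lines_to_map(lines):
--     hill_map = []
--     start_coords = None
--     end_coords = None
--
--
--     for ridx, line in enumerate(lines):
--         row = []
--         for cidx, ch in enumerate(line):
--             if ch == 'S':
--                 start_coords = Pos(ridx, cidx)
--                 elevation = 0
--             elif ch == 'E':
--                 end_coords = Pos(ridx, cidx)
--                 elevation = ord('z') - ord('a')
--             else:
--                 elevation = ord(ch) - ord('a')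
--
--             row.append(elevation)
--         hill_map.append(row)
--
--     return hill_map, start_coords, end_coords
-- ===== SOURCE B (Python) =====
-- from collections import namedtuple
--
-- Pos = namedtuple('Pos', ['row', 'col'])
--
-- def _last_pos(lines, target):
--     pos = None
--     for ridx, line in enumerate(lines):
--         for cidx, ch in enumerate(line):
--             if ch == target:
--                 pos = Pos(ridx, cidx)
--     return pos
--
-- def _elevation(ch):
--     if ch == 'S':
--         return 0
--     if ch == 'E':
--         return ord('z') - ord('a')
--     return ord(ch) - ord('a')
--
-- def lines_to_map(lines):
--     hill_map = [[_elevation(ch) for ch in line] for line in lines]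
--     return hill_map, _last_pos(lines, 'S'), _last_pos(lines, 'E')
-- ===== Notes on version B (the rewrite author's own statement) =====
-- stated objective: simpler
-- what changed: Separates the single state-carrying loop of A into a pure nested comprehension building the elevation grid plus an independent last-occurrence scan per marker character, with no shared mutable state.
import Mathlib
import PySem

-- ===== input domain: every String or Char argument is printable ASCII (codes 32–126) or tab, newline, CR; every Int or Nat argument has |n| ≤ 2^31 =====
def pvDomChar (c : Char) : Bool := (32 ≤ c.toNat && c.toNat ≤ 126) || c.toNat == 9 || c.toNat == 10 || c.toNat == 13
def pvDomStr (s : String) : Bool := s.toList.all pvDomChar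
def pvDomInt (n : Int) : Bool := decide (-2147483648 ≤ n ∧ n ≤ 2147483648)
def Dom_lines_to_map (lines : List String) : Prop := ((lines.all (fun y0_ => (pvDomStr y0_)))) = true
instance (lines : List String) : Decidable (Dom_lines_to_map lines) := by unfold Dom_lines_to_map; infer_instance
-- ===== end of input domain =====

-- B replaces A's single stateful loop by a pure nested comprehension for the grid plus an
-- independent last-occurrence scan per marker character (objective: simpler decomposition).

-- ===== PORT A =====
-- A's inner-loop body: one character step threading (row, start_coords, end_coords).
def pvStepA (ridx : Int) (st2 : List Int × Option (Int × Int) × Option (Int × Int))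
    (q : Int × Char) : List Int × Option (Int × Int) × Option (Int × Int) :=
  if q.2 = 'S' then (st2.1 ++ [(0 : Int)], some (ridx, q.1), st2.2.2)
  else if q.2 = 'E' then (st2.1 ++ [('z'.toNat : Int) - ('a'.toNat : Int)], st2.2.1, some (ridx, q.1))
  else (st2.1 ++ [(q.2.toNat : Int) - ('a'.toNat : Int)], st2.2.1, st2.2.2)

-- A's outer-loop body: process one enumerated line, threading the whole state.
def pvRowA (st : List (List Int) × Option (Int × Int) × Option (Int × Int))
    (p : Int × String) : List (List Int) × Option (Int × Int) × Option (Int × Int) :=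
  let inner := (PySem.List.enumerate p.2.toList 0).foldl (pvStepA p.1) (([] : List Int), st.2.1, st.2.2)
  (st.1 ++ [inner.1], inner.2)

def lines_to_map (lines : List String) : List (List Int) × (Option (Int × Int)) × (Option (Int × Int)) :=
  (PySem.List.enumerate lines 0).foldl pvRowA
    (([] : List (List Int)), (none : Option (Int × Int)), (none : Option (Int × Int)))

-- ===== PORT B =====
def pvElev (ch : Char) : Int :=
  if ch = 'S' then 0
  else if ch = 'E' then ('z'.toNat : Int) - ('a'.toNat : Int)
  else (ch.toNat : Int) - ('a'.toNat : Int)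

-- B's _last_pos inner assignment: overwrite pos whenever the target is seen.
def pvScanStep (target : Char) (ridx : Int) (pos : Option (Int × Int)) (q : Int × Char) :
    Option (Int × Int) :=
  if q.2 = target then some (ridx, q.1) else pos

def pvLastPos (lines : List String) (target : Char) : Option (Int × Int) :=
  (PySem.List.enumerate lines 0).foldl
    (fun pos p => (PySem.List.enumerate p.2.toList 0).foldl (pvScanStep target p.1) pos)
    none

def lines_to_map_alt (lines : List String) : List (List Int) × (Option (Int × Int)) × (Option (Int × Int)) :=
  (lines.map (fun line => line.toList.map pvElev), pvLastPos lines 'S', pvLastPos lines 'E')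

-- ===== PRECONDITION & SPEC =====
def Spec_lines_to_map (lines : List String) (out : List (List Int) × (Option (Int × Int)) × (Option (Int × Int))) : Prop := out = lines_to_map_alt lines
instance (lines : List String) (out : List (List Int) × (Option (Int × Int)) × (Option (Int × Int))) : Decidable (Spec_lines_to_map lines out) := by unfold Spec_lines_to_map; infer_instance

-- ===== CLAIM (what is proved, stated in full; the proofs are below) =====
def Claim_equal_lines_to_map : Prop := ∀ (lines : List String), Dom_lines_to_map lines → Spec_lines_to_map lines (lines_to_map lines)

-- ===== LEMMAS AND PROOFS =====

theorem pvStepA_eq (ridx : Int) (r : List Int) (sp ep : Option (Int × Int)) (s : Int) (c : Char) :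
    pvStepA ridx (r, sp, ep) (s, c)
      = (r ++ [pvElev c], pvScanStep 'S' ridx sp (s, c), pvScanStep 'E' ridx ep (s, c)) := by
  by_cases hS : c = 'S'
  · subst hS; rfl
  · by_cases hE : c = 'E'
    · subst hE; rfl
    · simp [pvStepA, pvScanStep, pvElev, hS, hE]

-- A's inner loop = B's per-line map, plus B's per-line last-occurrence scans for 'S' and 'E'.
theorem inner_eq (cs : List Char) : ∀ (s ridx : Int) (r : List Int) (sp ep : Option (Int × Int)),
    (PySem.List.enumerate cs s).foldl (pvStepA ridx) (r, sp, ep)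
    = (r ++ cs.map pvElev,
       (PySem.List.enumerate cs s).foldl (pvScanStep 'S' ridx) sp,
       (PySem.List.enumerate cs s).foldl (pvScanStep 'E' ridx) ep) := by
  induction cs with
  | nil => intro s ridx r sp ep; simp [PySem.List.enumerate_nil]
  | cons c cs ih =>
    intro s ridx r sp ep
    rw [PySem.List.enumerate_cons]
    simp only [List.foldl_cons, pvStepA_eq, ih, List.map_cons, List.append_assoc,
      List.singleton_append]

-- A's outer loop = B's grid map plus B's two whole-input scans, from any starting state.
theorem outer_eq (lines : List String) : ∀ (s : Int) (g : List (List Int)) (sp ep : Option (Int × Int)),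
    (PySem.List.enumerate lines s).foldl pvRowA (g, sp, ep)
    = (g ++ lines.map (fun line => line.toList.map pvElev),
       (PySem.List.enumerate lines s).foldl
         (fun pos p => (PySem.List.enumerate p.2.toList 0).foldl (pvScanStep 'S' p.1) pos) sp,
       (PySem.List.enumerate lines s).foldl
         (fun pos p => (PySem.List.enumerate p.2.toList 0).foldl (pvScanStep 'E' p.1) pos) ep) := by
  induction lines with
  | nil => intro s g sp ep; simp [PySem.List.enumerate_nil]
  | cons l ls ih =>
    intro s g sp ep
    rw [PySem.List.enumerate_cons]
    simp only [List.foldl_cons, pvRowA, inner_eq, List.nil_append, ih, List.map_cons,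
      List.append_assoc, List.singleton_append]

-- ===== VERDICT (by name: the statement is the Claim_ definition above) =====
theorem lines_to_map_spec : Claim_equal_lines_to_map := by
  intro lines _
  show lines_to_map lines = lines_to_map_alt lines
  unfold lines_to_map lines_to_map_alt pvLastPos
  rw [outer_eq]
  simp
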